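-- pv_equiv track=rewrite | github.com/bibymaths/bio-sea-pearl | alignment/bin/align.py | extract_lcs_from_alignment
-- ===== SOURCE A (Python) =====
-- def extract_lcs_from_alignment(aln_a, aln_b):
--     """Extracts longest common subsequence runs from aligned sequences."""
--     runs = []
--     current_run = ""
--     for char_a, char_b in zip(aln_a, aln_b):
--         if char_a == char_b and char_a != '-':
--             current_run += char_a
--         else:
--             if current_run:
--                 runs.append(current_run)
--             current_run = ""
--     if current_run:
--         runs.append(current_run)
--     return runs
-- ===== SOURCE B (Python) =====
-- from itertools import groupby
--
-- def extract_lcs_from_alignment(aln_a, aln_b):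
--     """Extracts longest common subsequence runs from aligned sequences."""
--     runs = []
--     for key, group in groupby(zip(aln_a, aln_b),
--                               key=lambda p: p[0] == p[1] and p[0] != '-'):
--         if key:
--             runs.append(''.join(c_a for c_a, _ in group))
--     return runs
-- ===== Notes on version B (the rewrite author's own statement) =====
-- stated objective: idiomatic
-- what changed: Replaces the explicit current_run accumulator with flush-on-mismatch by itertools.groupby over zip(aln_a, aln_b) keyed on 'matched non-gap', joining each True-group directly.
import Mathlib
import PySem

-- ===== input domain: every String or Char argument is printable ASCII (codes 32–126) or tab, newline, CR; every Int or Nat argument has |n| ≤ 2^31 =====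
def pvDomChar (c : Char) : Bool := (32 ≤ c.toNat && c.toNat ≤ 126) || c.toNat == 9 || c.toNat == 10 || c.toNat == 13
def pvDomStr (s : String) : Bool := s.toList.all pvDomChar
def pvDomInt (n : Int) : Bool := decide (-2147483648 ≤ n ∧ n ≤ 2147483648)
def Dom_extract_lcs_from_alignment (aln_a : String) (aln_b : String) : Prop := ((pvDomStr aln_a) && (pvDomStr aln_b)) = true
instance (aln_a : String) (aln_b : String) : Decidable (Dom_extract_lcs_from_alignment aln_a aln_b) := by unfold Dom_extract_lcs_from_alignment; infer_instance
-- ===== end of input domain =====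

-- B replaces A's running-accumulator loop with consecutive grouping (itertools.groupby) over the zipped pair stream (idiomatic; same complexity).

-- ===== PORT A =====
-- the loop state: (runs so far, current_run as chars); one step of A's loop body
def pvAStep (s : List String × List Char) (p : Char × Char) : List String × List Char :=
  if p.1 == p.2 && p.1 != '-' then (s.1, s.2 ++ [p.1])
  else (if s.2.isEmpty then s.1 else s.1 ++ [String.ofList s.2], [])

def pvAFinish (s : List String × List Char) : List String :=
  if s.2.isEmpty then s.1 else s.1 ++ [String.ofList s.2]

def extract_lcs_from_alignment (aln_a : String) (aln_b : String) : List String :=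
  pvAFinish ((List.zip aln_a.toList aln_b.toList).foldl pvAStep ([], []))

-- ===== PORT B =====
-- the groupby key
def pvMatch (p : Char × Char) : Bool := p.1 == p.2 && p.1 != '-'

-- iterate over maximal consecutive groups of equal key (= itertools.groupby);
-- emit the join of a True-group, skip a False element
def pvBGroups : List (Char × Char) → List String
  | [] => []
  | p :: ps =>
    if pvMatch p then
      String.ofList (((p :: ps).takeWhile pvMatch).map Prod.fst)
        :: pvBGroups ((p :: ps).dropWhile pvMatch)
    else pvBGroups ps
  termination_by l => l.length
  decreasing_by
    · simp_all [List.dropWhile]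
      have := List.length_dropWhile_le pvMatch ps
      omega
    · simp

def extract_lcs_from_alignment_alt (aln_a : String) (aln_b : String) : List String :=
  pvBGroups (List.zip aln_a.toList aln_b.toList)

-- ===== PRECONDITION & SPEC =====
def Spec_extract_lcs_from_alignment (aln_a : String) (aln_b : String) (out : List String) : Prop := out = extract_lcs_from_alignment_alt aln_a aln_b
instance (aln_a : String) (aln_b : String) (out : List String) : Decidable (Spec_extract_lcs_from_alignment aln_a aln_b out) := by unfold Spec_extract_lcs_from_alignment; infer_instance

-- ===== CLAIM (what is proved, stated in full; the proofs are below) =====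
def Claim_equal_extract_lcs_from_alignment : Prop := ∀ (aln_a : String) (aln_b : String), Dom_extract_lcs_from_alignment aln_a aln_b → Spec_extract_lcs_from_alignment aln_a aln_b (extract_lcs_from_alignment aln_a aln_b)

-- ===== LEMMAS AND PROOFS =====

-- A's remaining output given a pending current_run `cur` and remaining input `l`
def pvRest (cur : List Char) : List (Char × Char) → List String
  | [] => if cur.isEmpty then [] else [String.ofList cur]
  | p :: ps =>
    if pvMatch p then pvRest (cur ++ [p.1]) ps
    else (if cur.isEmpty then [] else [String.ofList cur]) ++ pvRest [] ps

theorem pvAFinish_foldl (l : List (Char × Char)) (runs : List String) (cur : List Char) :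
    pvAFinish (l.foldl pvAStep (runs, cur)) = runs ++ pvRest cur l := by
  induction l generalizing runs cur with
  | nil => simp [pvAFinish, pvRest]; split <;> simp
  | cons p ps ih =>
    simp only [List.foldl_cons, pvAStep, pvRest, pvMatch]
    split
    · exact ih runs (cur ++ [p.1])
    · rw [ih]
      split <;> simp

theorem pvRest_eq_groups (l : List (Char × Char)) (cur : List Char) :
    pvRest cur l =
      if cur.isEmpty then pvBGroups l
      else String.ofList (cur ++ (l.takeWhile pvMatch).map Prod.fst)
            :: pvBGroups (l.dropWhile pvMatch) := by
  induction l generalizing cur with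
  | nil => by_cases hc : cur.isEmpty <;> simp [pvRest, pvBGroups, hc]
  | cons p ps ih =>
    by_cases hm : pvMatch p = true
    · rw [pvRest, if_pos hm, ih, pvBGroups, if_pos hm,
          List.takeWhile_cons_of_pos hm, List.dropWhile_cons_of_pos hm]
      by_cases hc : cur.isEmpty <;> simp_all
    · have hb : pvBGroups (p :: ps) = pvBGroups ps := by
        rw [pvBGroups, if_neg hm]
      rw [pvRest, if_neg hm, ih,
          List.takeWhile_cons_of_neg (by simp [hm]),
          List.dropWhile_cons_of_neg (by simp [hm]), hb]
      by_cases hc : cur.isEmpty <;> simp [hc]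

-- ===== VERDICT (by name: the statement is the Claim_ definition above) =====
theorem extract_lcs_from_alignment_spec : Claim_equal_extract_lcs_from_alignment := by
  intro a b _
  show _ = _
  rw [extract_lcs_from_alignment, extract_lcs_from_alignment_alt,
      pvAFinish_foldl, pvRest_eq_groups]
  simp
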